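-- pv_equiv track=rewrite | github.com/zaozao66/audit-rag | src/api/app.py | _resolve_cors_allow_headers
-- ===== SOURCE A (Python) =====
-- from typing import Any, Dict, List, Union
--
-- DEFAULT_CORS_ALLOW_HEADERS = [
--     'Content-Type',
--     'Authorization',
--     'X-Knowledge-Scope',
--     'X-RAG-Scope',
--     'X-Scope',
-- ]
--
-- def _resolve_cors_allow_headers(config: Dict[str, Any]) -> List[str]:
--     cors_config = config.get('cors', {})
--     configured_headers = cors_config.get('allow_headers')
--
--     merged_headers: List[str] = []
--     seen = set()
--
--     def _add(header: Any) -> None: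
--         normalized = str(header or '').strip()
--         if not normalized:
--             return
--         lowered = normalized.lower()
--         if lowered in seen:
--             return
--         seen.add(lowered)
--         merged_headers.append(normalized)
--
--     for header in DEFAULT_CORS_ALLOW_HEADERS:
--         _add(header)
--
--     if isinstance(configured_headers, str):
--         items = [item.strip() for item in configured_headers.split(',')]
--         for item in items:
--             _add(item)
--     elif isinstance(configured_headers, list):
--         for item in configured_headers:
--             _add(item)
--
--     return merged_headers
-- ===== SOURCE B (Python) =====
-- DEFAULT_CORS_ALLOW_HEADERS = [
--     'Content-Type',
--     'Authorization',
--     'X-Knowledge-Scope',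
--     'X-RAG-Scope',
--     'X-Scope',
-- ]
--
-- def _dedup_ci(items):
--     # recursive case-insensitive nub: keep the head, delete all later
--     # case-insensitive duplicates of it, recurse on what is left
--     if not items:
--         return []
--     head = items[0]
--     key = head.lower()
--     rest = [h for h in items[1:] if h.lower() != key]
--     return [head] + _dedup_ci(rest)
--
-- def _resolve_cors_allow_headers(config):
--     configured = config.get('cors', {}).get('allow_headers')
--     if isinstance(configured, str):
--         extra = configured.split(',')
--     elif isinstance(configured, list):
--         extra = configured
--     else:
--         extra = []
--     candidates = [str(h or '').strip() for h in DEFAULT_CORS_ALLOW_HEADERS + extra]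
--     return _dedup_ci([h for h in candidates if h])
-- ===== Notes on version B (the rewrite author's own statement) =====
-- stated objective: alternative
-- what changed: Replaces A's single pass that mutates a seen-set and an output list with staged normalization passes (resolve extras, strip all, drop empties) followed by a recursive case-insensitive nub that keeps each head and filters its later lowercase-duplicates out of the tail before recursing.
import Mathlib
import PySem

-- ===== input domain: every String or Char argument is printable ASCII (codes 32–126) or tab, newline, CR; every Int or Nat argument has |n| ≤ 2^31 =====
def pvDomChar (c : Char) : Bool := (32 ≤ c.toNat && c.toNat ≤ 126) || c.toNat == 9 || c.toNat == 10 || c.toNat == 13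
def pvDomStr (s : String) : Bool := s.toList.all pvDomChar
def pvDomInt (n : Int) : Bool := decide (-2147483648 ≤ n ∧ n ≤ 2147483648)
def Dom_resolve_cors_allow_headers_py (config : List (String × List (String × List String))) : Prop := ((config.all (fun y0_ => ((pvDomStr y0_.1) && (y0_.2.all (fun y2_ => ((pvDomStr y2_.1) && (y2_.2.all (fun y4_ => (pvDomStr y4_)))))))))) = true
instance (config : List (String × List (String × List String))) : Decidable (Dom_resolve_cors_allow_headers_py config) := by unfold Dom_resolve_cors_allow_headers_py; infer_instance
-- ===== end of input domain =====

-- B replaces A's single pass with a mutated seen-set by staged normalization passes plus a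
-- recursive case-insensitive nub (keep head, delete its later duplicates, recurse); same result.
-- Note: under the Lean type convention 'allow_headers' is always a list of strings (or absent),
-- so A's isinstance(str) branch and B's str-split branch are unreachable and not ported.

-- ===== PORT A =====
def pvDefaultHeaders : List String :=
  ["Content-Type", "Authorization", "X-Knowledge-Scope", "X-RAG-Scope", "X-Scope"]

-- the _add closure: state = (merged_headers, seen); str(header or '').strip() = strip header on strings
def pvAdd (st : List String × PySem.Set String) (header : String) :
    List String × PySem.Set String :=
  let normalized := PySem.Str.strip header
  if normalized = "" then st
  else
    let lowered := PySem.Str.lower normalized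
    if PySem.Set.contains st.2 lowered then st
    else (st.1 ++ [normalized], PySem.Set.add st.2 lowered)

def resolve_cors_allow_headers_py (config : List (String × List (String × List String))) : List String :=
  -- config.get('cors', {}) / cors_config.get('allow_headers'): first-match association-list lookup
  let cors_config := ((config.find? (fun p => p.1 == "cors")).map (·.2)).getD []
  let configured_headers := (cors_config.find? (fun p => p.1 == "allow_headers")).map (·.2)
  let st := pvDefaultHeaders.foldl pvAdd ([], PySem.Set.empty)
  let st :=
    match configured_headers with
    | some items => items.foldl pvAdd st   -- isinstance(list) branch
    | none => st
  st.1

-- ===== PORT B =====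
-- _dedup_ci: keep the head, filter its later case-insensitive duplicates out, recurse
def pvDedupCI : List String → List String
  | [] => []
  | head :: t =>
    let key := PySem.Str.lower head
    head :: pvDedupCI (t.filter (fun h => PySem.Str.lower h != key))
termination_by l => l.length
decreasing_by
  simp only [List.length_unattach]
  exact Nat.lt_succ_of_le (le_trans (List.length_filter_le _ _) (by simp))

def resolve_cors_allow_headers_py_alt (config : List (String × List (String × List String))) : List String :=
  let cors_config := ((config.find? (fun p => p.1 == "cors")).map (·.2)).getD []
  let extra := ((cors_config.find? (fun p => p.1 == "allow_headers")).map (·.2)).getD []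
  let candidates := (pvDefaultHeaders ++ extra).map PySem.Str.strip
  pvDedupCI (candidates.filter (fun h => h != ""))

-- ===== PRECONDITION & SPEC =====
def Spec_resolve_cors_allow_headers_py (config : List (String × List (String × List String))) (out : List String) : Prop := out = resolve_cors_allow_headers_py_alt config
instance (config : List (String × List (String × List String))) (out : List String) : Decidable (Spec_resolve_cors_allow_headers_py config out) := by unfold Spec_resolve_cors_allow_headers_py; infer_instance

-- ===== CLAIM (what is proved, stated in full; the proofs are below) =====
def Claim_equal_resolve_cors_allow_headers_py : Prop := ∀ (config : List (String × List (String × List String))), Dom_resolve_cors_allow_headers_py config → Spec_resolve_cors_allow_headers_py config (resolve_cors_allow_headers_py config)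

-- ===== LEMMAS AND PROOFS =====

-- a fresh key toggles exactly one extra filter
lemma pv_contains_add (s : PySem.Set String) (k y : String) :
    (!PySem.Set.contains (PySem.Set.add s k) y) = ((y != k) && (!PySem.Set.contains s y)) := by
  by_cases h1 : y ∈ s <;> by_cases h2 : y = k <;>
    simp [PySem.Set.mem_add, h1, h2]

-- loop invariant: A's fold from state (m, s) appends exactly the recursive nub of the
-- still-unseen normalized nonempty headers
lemma pv_fold_eq (xs : List String) (m : List String) (s : PySem.Set String) :
    (xs.foldl pvAdd (m, s)).1
      = m ++ pvDedupCI (((xs.map PySem.Str.strip).filter (fun h => h != "")).filter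
          (fun y => !PySem.Set.contains s (PySem.Str.lower y))) := by
  induction xs generalizing m s with
  | nil => simp [pvDedupCI]
  | cons x t ih =>
    by_cases hn : PySem.Str.strip x = ""
    · have h1 : pvAdd (m, s) x = (m, s) := by simp [pvAdd, hn]
      rw [List.foldl_cons, h1, ih m s]
      simp [hn]
    · by_cases hm : PySem.Str.lower (PySem.Str.strip x) ∈ s
      · have h1 : pvAdd (m, s) x = (m, s) := by
          simp [pvAdd, hn, hm]
        rw [List.foldl_cons, h1, ih m s]
        simp [hn, hm]
      · have h1 : pvAdd (m, s) x
            = (m ++ [PySem.Str.strip x], PySem.Set.add s (PySem.Str.lower (PySem.Str.strip x))) := by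
          simp [pvAdd, hn, hm]
        have hfilters :
            ((t.map PySem.Str.strip).filter (fun h => h != "")).filter
                (fun y => !PySem.Set.contains (PySem.Set.add s (PySem.Str.lower (PySem.Str.strip x))) (PySem.Str.lower y))
              = (((t.map PySem.Str.strip).filter (fun h => h != "")).filter
                  (fun y => !PySem.Set.contains s (PySem.Str.lower y))).filter
                  (fun y => PySem.Str.lower y != PySem.Str.lower (PySem.Str.strip x)) := by
          conv_lhs => rw [List.filter_filter]
          conv_rhs => rw [List.filter_filter, List.filter_filter]
          apply List.filter_congr
          intro y _
          rw [pv_contains_add]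
        have hR : ((((x :: t).map PySem.Str.strip).filter (fun h => h != "")).filter
              (fun y => !PySem.Set.contains s (PySem.Str.lower y)))
            = PySem.Str.strip x :: (((t.map PySem.Str.strip).filter (fun h => h != "")).filter
              (fun y => !PySem.Set.contains s (PySem.Str.lower y))) := by
          simp [hn, hm]
        rw [List.foldl_cons, h1,
            ih (m ++ [PySem.Str.strip x]) (PySem.Set.add s (PySem.Str.lower (PySem.Str.strip x))),
            hfilters, hR, pvDedupCI]
        simp

-- ===== VERDICT (by name: the statement is the Claim_ definition above) =====
theorem resolve_cors_allow_headers_py_spec : Claim_equal_resolve_cors_allow_headers_py := by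
  intro config _
  unfold Spec_resolve_cors_allow_headers_py resolve_cors_allow_headers_py resolve_cors_allow_headers_py_alt
  cases hfind : ((((config.find? (fun p => p.1 == "cors")).map (·.2)).getD []).find? (fun p => p.1 == "allow_headers")) with
  | none =>
    simp only [hfind, Option.map_none, Option.getD_none, List.append_nil]
    simpa using pv_fold_eq pvDefaultHeaders [] PySem.Set.empty
  | some p =>
    simp only [hfind, Option.map_some, Option.getD_some]
    rw [← List.foldl_append]
    simpa using pv_fold_eq (pvDefaultHeaders ++ p.2) [] PySem.Set.empty
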